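-- pv_equiv track=rewrite | github.com/markpolyak/lab_grader_web | grading/github_client.py | check_forbidden_modifications
-- ===== SOURCE A (Python) =====
-- from typing import Any
--
-- def check_forbidden_modifications(
--     commit_files: list[dict[str, Any]],
--     forbidden_patterns: list[str]
-- ) -> list[str]:
--     """
--     Check if any forbidden files were modified in a commit.
--
--     Args:
--         commit_files: List of file dicts from commit (with 'filename' and 'status')
--         forbidden_patterns: List of forbidden file paths or prefixes
--
--     Returns:
--         List of forbidden files that were modified
--
--     Examples:
--         >>> files = [{"filename": "test_main.py", "status": "modified"}]
--         >>> check_forbidden_modifications(files, ["test_main.py"])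
--         ['test_main.py']
--     """
--     violations = []
--
--     for file_info in commit_files:
--         filename = file_info.get("filename", "")
--         status = file_info.get("status", "")
--
--         # Only check removed or modified files
--         if status not in ("removed", "modified"):
--             continue
--
--         for pattern in forbidden_patterns:
--             # Exact match or prefix match (for directories like "tests/")
--             if filename == pattern or filename.startswith(pattern):
--                 violations.append(filename)
--                 break
--
--     return violations
-- ===== SOURCE B (Python) =====
-- def check_forbidden_modifications(
--     commit_files: list,
--     forbidden_patterns: list
-- ) -> list:
--     """Index the patterns once (a set of patterns plus the set of their
--     lengths); a filename violates iff one of its prefixes whose length is a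
--     pattern length is in the pattern set, so no scan over the patterns per
--     file is needed."""
--     pattern_set = set(forbidden_patterns)
--     length_set = {len(p) for p in forbidden_patterns}
--     violations = []
--     for file_info in commit_files:
--         filename = file_info.get("filename", "")
--         status = file_info.get("status", "")
--         if status in ("removed", "modified"):
--             if any(k <= len(filename) and filename[:k] in pattern_set
--                    for k in length_set):
--                 violations.append(filename)
--     return violations
-- ===== Notes on version B (the rewrite author's own statement) =====
-- stated objective: alternative
-- what changed: B indexes the patterns once (a set of patterns plus the set of their lengths) and tests each filename by membership lookups of its prefixes of those lengths, removing A's inner scan over all patterns per file.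
import Mathlib
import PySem

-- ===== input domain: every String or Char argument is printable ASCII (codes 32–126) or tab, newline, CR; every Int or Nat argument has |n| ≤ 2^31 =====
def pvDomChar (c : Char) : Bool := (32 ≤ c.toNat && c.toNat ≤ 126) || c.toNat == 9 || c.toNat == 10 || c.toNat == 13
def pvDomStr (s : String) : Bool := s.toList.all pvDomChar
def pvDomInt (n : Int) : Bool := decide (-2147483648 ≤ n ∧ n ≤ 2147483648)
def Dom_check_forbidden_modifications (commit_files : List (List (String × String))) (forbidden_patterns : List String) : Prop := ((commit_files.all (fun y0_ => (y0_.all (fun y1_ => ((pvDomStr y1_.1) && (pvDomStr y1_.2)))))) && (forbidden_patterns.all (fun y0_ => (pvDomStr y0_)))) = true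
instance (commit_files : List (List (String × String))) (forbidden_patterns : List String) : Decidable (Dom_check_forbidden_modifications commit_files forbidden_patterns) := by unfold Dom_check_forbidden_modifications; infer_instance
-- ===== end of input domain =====

-- B replaces A's inner scan over all patterns by a pattern set and a set of
-- pattern lengths built once, testing each filename by membership of its
-- prefixes of those lengths (objective: alternative algorithm, same results).

-- ===== PORT A =====
-- inner 'for pattern in forbidden_patterns: … break' loop of A
def pvMatchA (filename : String) : List String → Bool
  | [] => false
  | p :: rest =>
      if filename == p || PySem.Str.startswith filename p then true
      else pvMatchA filename rest

def check_forbidden_modifications (commit_files : List (List (String × String))) (forbidden_patterns : List String) : List String :=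
  commit_files.foldl (fun violations file_info =>
    let filename := PySem.Dict.getD ⟨file_info⟩ "filename" ""
    let status := PySem.Dict.getD ⟨file_info⟩ "status" ""
    if !(status == "removed" || status == "modified") then violations
    else if pvMatchA filename forbidden_patterns then violations ++ [filename]
    else violations) []

-- ===== PORT B =====
-- 'any(k <= len(filename) and filename[:k] in pattern_set for k in length_set)'
def pvAnyPrefixHit (filename : String) (length_set : PySem.Set Int) (pattern_set : PySem.Set String) : Bool :=
  length_set.any (fun k =>
    decide (k ≤ PySem.Str.len filename) &&
    PySem.Set.contains pattern_set (PySem.Str.slice filename none (some k)))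

def check_forbidden_modifications_alt (commit_files : List (List (String × String))) (forbidden_patterns : List String) : List String :=
  let pattern_set : PySem.Set String := PySem.Set.ofList forbidden_patterns
  let length_set : PySem.Set Int := PySem.Set.ofList (forbidden_patterns.map PySem.Str.len)
  commit_files.foldl (fun violations file_info =>
    let filename := PySem.Dict.getD ⟨file_info⟩ "filename" ""
    let status := PySem.Dict.getD ⟨file_info⟩ "status" ""
    if status == "removed" || status == "modified" then
      if pvAnyPrefixHit filename length_set pattern_set then violations ++ [filename]
      else violations
    else violations) []

-- ===== PRECONDITION & SPEC =====
def Spec_check_forbidden_modifications (commit_files : List (List (String × String))) (forbidden_patterns : List String) (out : List String) : Prop := out = check_forbidden_modifications_alt commit_files forbidden_patterns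
instance (commit_files : List (List (String × String))) (forbidden_patterns : List String) (out : List String) : Decidable (Spec_check_forbidden_modifications commit_files forbidden_patterns out) := by unfold Spec_check_forbidden_modifications; infer_instance

-- ===== CLAIM (what is proved, stated in full; the proofs are below) =====
def Claim_equal_check_forbidden_modifications : Prop := ∀ (commit_files : List (List (String × String))) (forbidden_patterns : List String), Dom_check_forbidden_modifications commit_files forbidden_patterns → Spec_check_forbidden_modifications commit_files forbidden_patterns (check_forbidden_modifications commit_files forbidden_patterns)

-- ===== LEMMAS AND PROOFS =====

-- A's inner loop hits iff some pattern is a prefix of the filename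
theorem pvMatchA_iff (fn : String) (ps : List String) :
    pvMatchA fn ps = true ↔ ∃ p ∈ ps, p.toList <+: fn.toList := by
  induction ps with
  | nil => simp [pvMatchA]
  | cons p rest ih =>
      simp only [pvMatchA]
      by_cases h : (fn == p || PySem.Str.startswith fn p) = true
      · simp only [h, if_true, true_iff]
        refine ⟨p, List.mem_cons_self, ?_⟩
        simp only [Bool.or_eq_true, beq_iff_eq] at h
        rcases h with h' | h'
        · subst h'; exact List.prefix_refl _
        · exact (PySem.Chars.startswith_iff fn.toList p.toList).mp (by simpa using h')
      · rw [if_neg h, ih]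
        constructor
        · rintro ⟨q, hq, hpre⟩; exact ⟨q, List.mem_cons_of_mem _ hq, hpre⟩
        · rintro ⟨q, hq, hpre⟩
          rcases List.mem_cons.mp hq with rfl | hq'
          · exfalso
            apply h
            have : PySem.Str.startswith fn q = true := by
              simpa using (PySem.Chars.startswith_iff fn.toList q.toList).mpr hpre
            simp only [Bool.or_eq_true]
            exact Or.inr (by simpa using this)
          · exact ⟨q, hq', hpre⟩

-- any initial slice xs[:k] is a prefix of xs, whatever the sign of k
theorem pvSliceToPrefix (xs : List Char) (k : Int) : PySem.List.slice xs none (some k) <+: xs := by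
  by_cases h0 : 0 ≤ k
  · rw [PySem.List.slice_to xs h0]; exact List.take_prefix _ _
  · rw [show k = -((((-k).toNat) : Nat) : Int) by omega,
      PySem.List.slice_to_neg_natCast _ _ (by omega)]
    exact List.take_prefix _ _

-- B's inner test hits iff some pattern is a prefix of the filename
theorem pvAnyPrefixHit_iff (fn : String) (fp : List String) :
    pvAnyPrefixHit fn (PySem.Set.ofList (fp.map PySem.Str.len)) (PySem.Set.ofList fp) = true
      ↔ ∃ p ∈ fp, p.toList <+: fn.toList := by
  unfold pvAnyPrefixHit
  rw [List.any_eq_true]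
  constructor
  · rintro ⟨k, -, hk⟩
    simp only [Bool.and_eq_true] at hk
    obtain ⟨-, hmem⟩ := hk
    have hmem' : PySem.Str.slice fn none (some k) ∈ fp :=
      (PySem.Set.mem_ofList fp _).mp ((PySem.Set.contains_iff _ _).mp hmem)
    refine ⟨_, hmem', ?_⟩
    simp only [PySem.Str.toList_slice, PySem.Chars.slice_eq_listSlice]
    exact pvSliceToPrefix fn.toList k
  · rintro ⟨p, hp, hpre⟩
    refine ⟨PySem.Str.len p, (PySem.Set.mem_ofList _ _).mpr (List.mem_map_of_mem hp), ?_⟩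
    have hlen : p.toList.length ≤ fn.toList.length := hpre.length_le
    simp only [Bool.and_eq_true]
    refine ⟨?_, ?_⟩
    · simp only [PySem.Str.len_eq, decide_eq_true_eq]
      exact_mod_cast hlen
    · have hslice : PySem.Str.slice fn none (some (PySem.Str.len p)) = p := by
        apply String.toList_inj.mp
        simp only [PySem.Str.toList_slice, PySem.Chars.slice_eq_listSlice,
          PySem.Str.len_eq, PySem.List.slice_to_natCast]
        exact (List.prefix_iff_eq_take.mp hpre).symm
      rw [hslice]
      exact (PySem.Set.contains_iff _ _).mpr ((PySem.Set.mem_ofList fp p).mpr hp)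

theorem pvInner_eq (fn : String) (fp : List String) :
    pvMatchA fn fp
      = pvAnyPrefixHit fn (PySem.Set.ofList (fp.map PySem.Str.len)) (PySem.Set.ofList fp) := by
  rw [Bool.eq_iff_iff, pvMatchA_iff, pvAnyPrefixHit_iff]

-- ===== VERDICT (by name: the statement is the Claim_ definition above) =====
theorem check_forbidden_modifications_spec : Claim_equal_check_forbidden_modifications := by
  intro commit_files forbidden_patterns _
  unfold Spec_check_forbidden_modifications
  unfold check_forbidden_modifications check_forbidden_modifications_alt
  dsimp only
  refine PySem.List.foldl_congr_mem _ _ _ _ (fun violations file_info _ => ?_)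
  simp only [pvInner_eq]
  by_cases h : (PySem.Dict.getD ⟨file_info⟩ "status" "" == "removed"
      || PySem.Dict.getD ⟨file_info⟩ "status" "" == "modified") = true <;>
    simp [h]
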